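-- pv_equiv track=rewrite | github.com/anhdungbmt2001/CS114.M11.KHCL | BAITAP02/NgonNguCuaLan.py | check_Lans_lang
-- ===== SOURCE A (Python) =====
-- def check_vocab(s):
--     if (s.endswith('lios')):
--         return [1, 1]
--     elif (s.endswith('liala')):
--         return [1, 2]
--     elif (s.endswith('etr')):
--         return [2, 1]
--     elif (s.endswith('etra')):
--         return [2, 2]
--     elif (s.endswith('initis')):
--         return [3, 1]
--     elif (s.endswith('inites')):
--         return [3, 2]
--     else:
--         return 0
--
-- def check_Lans_lang(s):
--
--     if (len(s.split()) == 1):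
--         if (check_vocab(s) != 0):
--             return "YES"
--         return "NO"
--
--     s = s.split()
--     count_noun = 0
--     for i in range(len(s)):
--         s[i] = check_vocab(s[i])
--         if (s[i] == 0):
--             return "NO"
--         if (s[i][0] == 2):
--             count_noun += 1
--             if (count_noun > 1):
--                 return "NO"
--     if (count_noun == 0):
--         return "NO"
--
--     gender = s[0][1]
--     for w in s:
--         if (w[1] != gender):
--             return "NO"
--
--     for i in range(len(s) - 1):
--         if (s[i+1][0] - s[i][0] not in [0, 1]):
--             return "NO"
--
--     return "YES"
-- ===== SOURCE B (Python) =====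
-- def check_vocab(s):
--     if s.endswith('lios'):
--         return [1, 1]
--     elif s.endswith('liala'):
--         return [1, 2]
--     elif s.endswith('etr'):
--         return [2, 1]
--     elif s.endswith('etra'):
--         return [2, 2]
--     elif s.endswith('initis'):
--         return [3, 1]
--     elif s.endswith('inites'):
--         return [3, 2]
--     else:
--         return 0
--
-- def check_Lans_lang(s):
--     words = s.split()
--     if len(words) == 1:
--         return "YES" if check_vocab(s) != 0 else "NO"
--     # Single-pass DFA recognising the sentence grammar  adjective* noun verb*
--     # (parts 1*2 3*) while remembering the gender of the first word.
--     gender = None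
--     after_noun = False
--     for w in words:
--         v = check_vocab(w)
--         if v == 0:
--             return "NO"
--         part, wg = v
--         if gender is None:
--             gender = wg
--         elif wg != gender:
--             return "NO"
--         if after_noun:
--             if part != 3:
--                 return "NO"
--         elif part == 2:
--             after_noun = True
--         elif part != 1:
--             return "NO"
--     return "YES" if after_noun else "NO"
-- ===== Notes on version B (the rewrite author's own statement) =====
-- stated objective: alternative
-- what changed: Replaces A's three staged checks (rewrite-and-count-nouns loop, gender loop, adjacent-difference loop) with a single fail-fast pass: a state machine that directly recognises the sentence grammar adjective* noun verb* (parts 1*2 3*) while remembering the gender of the first word.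
import Mathlib
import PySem

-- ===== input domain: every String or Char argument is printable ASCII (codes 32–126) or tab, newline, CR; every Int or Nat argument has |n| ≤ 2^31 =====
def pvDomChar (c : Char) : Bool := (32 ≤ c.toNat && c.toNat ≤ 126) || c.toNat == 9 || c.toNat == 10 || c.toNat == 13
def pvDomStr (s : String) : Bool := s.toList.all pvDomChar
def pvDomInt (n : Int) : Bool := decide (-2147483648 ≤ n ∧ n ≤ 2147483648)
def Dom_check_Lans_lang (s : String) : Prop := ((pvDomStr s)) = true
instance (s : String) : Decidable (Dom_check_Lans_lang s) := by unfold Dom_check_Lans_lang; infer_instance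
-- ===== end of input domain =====

-- B replaces A's rewrite-and-count loop plus two follow-up index loops by a single
-- fail-fast pass: a state machine recognising the grammar adjective* noun verb*
-- (parts 1*2 3*) while remembering the gender of the first word (alternative decomposition).

-- ===== PORT A =====
-- check_vocab: Python returns [part, gender] or 0; ported as Option (Int × Int), none = 0.
def check_vocab (s : String) : Option (Int × Int) :=
  if PySem.Str.endswith s "lios" then some (1, 1)
  else if PySem.Str.endswith s "liala" then some (1, 2)
  else if PySem.Str.endswith s "etr" then some (2, 1)
  else if PySem.Str.endswith s "etra" then some (2, 2)
  else if PySem.Str.endswith s "initis" then some (3, 1)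
  else if PySem.Str.endswith s "inites" then some (3, 2)
  else none

-- A's first loop: rewrites each word to its pair, counts nouns, early "NO" (= none) on a
-- vocab miss or a second noun; returns the rewritten list and the noun count.
def aFirstLoop : List String → Int → Option (List (Int × Int) × Int)
  | [], cnt => some ([], cnt)
  | w :: ws, cnt =>
    match check_vocab w with
    | none => none
    | some p =>
      if p.1 == 2 then
        if cnt + 1 > 1 then none
        else
          match aFirstLoop ws (cnt + 1) with
          | none => none
          | some (ps, c) => some (p :: ps, c)
      else
        match aFirstLoop ws cnt with
        | none => none
        | some (ps, c) => some (p :: ps, c)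

-- A's second loop: every gender equals gender of s[0]
def aGenderLoop : List (Int × Int) → Int → Bool
  | [], _ => true
  | p :: ps, g => if p.2 ≠ g then false else aGenderLoop ps g

-- A's third loop: adjacent part difference must be in [0, 1]
def aAdjLoop : List (Int × Int) → Bool
  | p :: q :: rest => if q.1 - p.1 = 0 ∨ q.1 - p.1 = 1 then aAdjLoop (q :: rest) else false
  | _ => true

def check_Lans_lang (s : String) : String :=
  let words := PySem.Str.split₀ s
  if words.length == 1 then
    if check_vocab s ≠ none then "YES" else "NO"
  else
    match aFirstLoop words 0 with
    | none => "NO"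
    | some (ps, cnt) =>
      if cnt == 0 then "NO"
      else
        match ps with
        | [] => "NO"  -- unreachable: cnt ≠ 0 forces ps ≠ []
        | p0 :: _ =>
          if ¬ aGenderLoop ps p0.2 then "NO"
          else if ¬ aAdjLoop ps then "NO"
          else "YES"

-- ===== PORT B =====
-- Source B's single for-loop over the words: gender : Option Int (None until the first word),
-- afterNoun : Bool (the DFA state), fail-fast "NO" returns become early result values.
def bLoop : List String → Option Int → Bool → String
  | [], _, afterNoun => if afterNoun then "YES" else "NO"
  | w :: ws, gender, afterNoun =>
    match check_vocab w with
    | none => "NO"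
    | some (part, wg) =>
      let gender' : Option Int :=
        match gender with
        | none => some wg
        | some g => some g
      match gender with
      | some g =>
        if wg ≠ g then "NO"
        else
          if afterNoun then
            if part ≠ 3 then "NO" else bLoop ws gender' afterNoun
          else if part == 2 then bLoop ws gender' true
          else if part ≠ 1 then "NO"
          else bLoop ws gender' afterNoun
      | none =>
          if afterNoun then
            if part ≠ 3 then "NO" else bLoop ws gender' afterNoun
          else if part == 2 then bLoop ws gender' true
          else if part ≠ 1 then "NO"
          else bLoop ws gender' afterNoun

def check_Lans_lang_alt (s : String) : String :=
  let words := PySem.Str.split₀ s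
  if words.length == 1 then
    if check_vocab s ≠ none then "YES" else "NO"
  else
    bLoop words none false

-- ===== PRECONDITION & SPEC =====
def Spec_check_Lans_lang (s : String) (out : String) : Prop := out = check_Lans_lang_alt s
instance (s : String) (out : String) : Decidable (Spec_check_Lans_lang s out) := by unfold Spec_check_Lans_lang; infer_instance

-- ===== CLAIM (what is proved, stated in full; the proofs are below) =====
def Claim_equal_check_Lans_lang : Prop := ∀ (s : String), Dom_check_Lans_lang s → Spec_check_Lans_lang s (check_Lans_lang s)

-- ===== LEMMAS AND PROOFS =====

-- proof-side: map each word to its pair, none on any vocab miss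
def mapVocab : List String → Option (List (Int × Int))
  | [] => some []
  | w :: ws =>
    match check_vocab w, mapVocab ws with
    | some p, some ps => some (p :: ps)
    | _, _ => none

-- noun count of a mapped word list, as A accumulates it
def countN : List (Int × Int) → Int
  | [] => 0
  | p :: ps => (if p.1 == 2 then 1 else 0) + countN ps

theorem countN_nonneg (ps : List (Int × Int)) : 0 ≤ countN ps := by
  induction ps with
  | nil => simp [countN]
  | cons p ps ih => simp only [countN]; split <;> omega

theorem aFirstLoop_eq (ws : List String) (cnt : Int) (hcnt : cnt ≤ 1) :
    aFirstLoop ws cnt =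
      match mapVocab ws with
      | none => none
      | some ps => if cnt + countN ps > 1 then none else some (ps, cnt + countN ps) := by
  induction ws generalizing cnt with
  | nil => simp [aFirstLoop, mapVocab, countN]; omega
  | cons w ws ih =>
    simp only [aFirstLoop, mapVocab]
    cases hv : check_vocab w with
    | none => simp
    | some p =>
      simp only []
      by_cases h2 : p.1 = 2
      · simp only [h2, beq_self_eq_true, if_true]
        by_cases hc : cnt + 1 > 1
        · simp only [hc, if_true]
          cases hm : mapVocab ws with
          | none => simp
          | some ps =>
            have hnn := countN_nonneg ps
            simp only [countN, h2, beq_self_eq_true, if_true]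
            have hgt : cnt + (1 + countN ps) > 1 := by omega
            simp [hgt]
        · simp only [hc, if_false, ih (cnt + 1) (by omega)]
          cases hm : mapVocab ws with
          | none => simp
          | some ps =>
            simp only [countN, h2, beq_self_eq_true, if_true]
            have harith : cnt + (1 + countN ps) = cnt + 1 + countN ps := by omega
            rw [harith]
            by_cases hg : cnt + 1 + countN ps > 1
            · simp [hg]
            · simp [hg]
      · simp only [beq_iff_eq, h2, if_false, ih cnt hcnt]
        cases hm : mapVocab ws with
        | none => simp
        | some ps =>
          simp only [countN, beq_iff_eq, h2, if_false, zero_add]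
          by_cases hg : cnt + countN ps > 1
          · simp [hg]
          · simp [hg]

-- parts of every vocab pair lie in {1,2,3}
theorem check_vocab_range (w : String) (p : Int × Int) (h : check_vocab w = some p) :
    p.1 = 1 ∨ p.1 = 2 ∨ p.1 = 3 := by
  unfold check_vocab at h
  split_ifs at h <;> (injection h with h'; rw [← h']; simp)

theorem mapVocab_range (ws : List String) (ps : List (Int × Int)) (h : mapVocab ws = some ps) :
    ∀ p ∈ ps, p.1 = 1 ∨ p.1 = 2 ∨ p.1 = 3 := by
  induction ws generalizing ps with
  | nil => simp [mapVocab] at h; subst h; simp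
  | cons w ws ih =>
    simp only [mapVocab] at h
    cases hv : check_vocab w with
    | none => rw [hv] at h; simp at h
    | some q =>
      rw [hv] at h
      cases hm : mapVocab ws with
      | none => rw [hm] at h; simp at h
      | some qs =>
        rw [hm] at h; simp at h; subst h
        intro p hp
        rcases List.mem_cons.mp hp with rfl | hp
        · exact check_vocab_range w p hv
        · exact ih qs hm p hp

-- the DFA on the parts sequence: accepts 1*2 3* (state = whether the noun was seen)
def partsOK : Bool → List Int → Bool
  | noun, [] => noun
  | true, x :: xs => if x = 3 then partsOK true xs else false
  | false, x :: xs =>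
    if x = 2 then partsOK true xs
    else if x = 1 then partsOK false xs
    else false

-- chain prev l: the adjacency condition of A's third loop starting against prev
def chain : Int → List Int → Bool
  | _, [] => true
  | prev, x :: xs => if x - prev = 0 ∨ x - prev = 1 then chain x xs else false

def adjP : List Int → Bool
  | [] => true
  | x :: xs => chain x xs

theorem aAdjLoop_eq_adjP (ps : List (Int × Int)) :
    aAdjLoop ps = adjP (ps.map Prod.fst) := by
  induction ps with
  | nil => rfl
  | cons p ps ih =>
    cases ps with
    | nil => rfl
    | cons q rest =>
      show (if q.1 - p.1 = 0 ∨ q.1 - p.1 = 1 then aAdjLoop (q :: rest) else false) = _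
      simp only [List.map_cons, adjP, chain]
      rw [ih]
      by_cases h : q.1 - p.1 = 0 ∨ q.1 - p.1 = 1 <;> simp [h, adjP]

theorem aGenderLoop_eq (ps : List (Int × Int)) (g : Int) :
    aGenderLoop ps g = ps.all (fun p => p.2 == g) := by
  induction ps with
  | nil => simp [aGenderLoop]
  | cons p ps ih =>
    simp only [aGenderLoop, List.all_cons, ih]
    by_cases h : p.2 = g
    · simp [h]
    · simp [h]

-- count of 2 in the parts list equals countN
theorem countN_eq_count2 (ps : List (Int × Int)) :
    countN ps = ((ps.map Prod.fst).count 2 : Int) := by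
  induction ps with
  | nil => simp [countN]
  | cons p ps ih =>
    simp only [countN, ih, List.map_cons, List.count_cons]
    by_cases h : p.1 = 2
    · simp [h]
      omega
    · simp [h]

theorem all3_count2 (l : List Int) (h : l.all (· == 3) = true) : l.count 2 = 0 := by
  induction l with
  | nil => simp
  | cons x xs ih =>
    simp only [List.all_cons, Bool.and_eq_true, beq_iff_eq] at h
    simp [h.1, ih h.2]

theorem chain3_eq (l : List Int) (hr : ∀ x ∈ l, x = 1 ∨ x = 2 ∨ x = 3) :
    chain 3 l = l.all (· == 3) := by
  induction l with
  | nil => rfl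
  | cons x xs ih =>
    have hx := hr x (by simp)
    simp only [chain, List.all_cons]
    rcases hx with rfl | rfl | rfl
    · norm_num
    · norm_num
    · simp only [show (3:Int) - 3 = 0 by norm_num]
      rw [if_pos (by norm_num)]
      rw [ih (fun y hy => hr y (List.mem_cons_of_mem _ hy))]
      simp

theorem chain2_count_eq (l : List Int) (hr : ∀ x ∈ l, x = 1 ∨ x = 2 ∨ x = 3) :
    (decide (l.count 2 = 0) && chain 2 l) = l.all (· == 3) := by
  induction l with
  | nil => rfl
  | cons x xs ih =>
    have hx := hr x (by simp)
    have hr' : ∀ y ∈ xs, y = 1 ∨ y = 2 ∨ y = 3 := fun y hy => hr y (List.mem_cons_of_mem _ hy)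
    simp only [List.all_cons, chain]
    rcases hx with rfl | rfl | rfl
    · norm_num
    · simp
    · rw [if_pos (by norm_num : (3:Int) - 2 = 0 ∨ (3:Int) - 2 = 1)]
      rw [chain3_eq xs hr']
      by_cases h3 : xs.all (· == 3) = true
      · have := all3_count2 xs h3
        simp [h3, this]
      · simp [eq_false_of_ne_true h3]

-- after the noun, only verbs (3) may follow
theorem partsOK_true_eq (l : List Int) : partsOK true l = l.all (· == 3) := by
  induction l with
  | nil => rfl
  | cons x xs ih =>
    simp only [partsOK, List.all_cons]
    by_cases h : x = 3 <;> simp [h, ih]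

-- KEY: the DFA for 1*2 3* equals A's pair of checks (exactly one noun + adjacency steps in {0,1})
theorem partsOK_false_eq (l : List Int) (hr : ∀ x ∈ l, x = 1 ∨ x = 2 ∨ x = 3) :
    partsOK false l = (decide (l.count 2 = 1) && adjP l) := by
  induction l with
  | nil => rfl
  | cons x xs ih =>
    have hx := hr x (by simp)
    have hr' : ∀ y ∈ xs, y = 1 ∨ y = 2 ∨ y = 3 := fun y hy => hr y (List.mem_cons_of_mem _ hy)
    simp only [partsOK, adjP]
    rcases hx with rfl | rfl | rfl
    · -- x = 1: same count, and a following 3 breaks both sides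
      rw [if_neg (by norm_num : ¬ (1:Int) = 2), if_pos rfl, ih hr']
      simp only [List.count_cons, show ((1:Int) == 2) = false by decide]
      cases xs with
      | nil => simp [adjP]
      | cons y ys =>
        have hy := hr' y (by simp)
        have hys : ∀ z ∈ ys, z = 1 ∨ z = 2 ∨ z = 3 := fun z hz => hr' z (List.mem_cons_of_mem _ hz)
        simp only [adjP, chain]
        rcases hy with rfl | rfl | rfl
        · rw [if_pos (by norm_num : (1:Int) - 1 = 0 ∨ (1:Int) - 1 = 1)]
          norm_num
        · rw [if_pos (by norm_num : (2:Int) - 1 = 0 ∨ (2:Int) - 1 = 1)]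
          norm_num
        · rw [if_neg (by norm_num : ¬ ((3:Int) - 1 = 0 ∨ (3:Int) - 1 = 1))]
          simp only [Bool.and_false]
          rw [chain3_eq ys hys]
          by_cases h3 : ys.all (· == 3) = true
          · have := all3_count2 ys h3
            simp [this, h3]
          · simp [eq_false_of_ne_true h3]
    · -- x = 2: tail must be all 3
      rw [if_pos rfl, partsOK_true_eq]
      rw [← chain2_count_eq xs hr']
      simp only [List.count_cons, show ((2:Int) == 2) = true by decide, if_true]
      by_cases hc : xs.count 2 = 0
      · simp [hc]
      · simp [hc]
    · -- x = 3: DFA rejects; a noun is unreachable after 3 along the chain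
      rw [if_neg (by norm_num : ¬ (3:Int) = 2), if_neg (by norm_num : ¬ (3:Int) = 1)]
      rw [chain3_eq xs hr']
      by_cases h3 : xs.all (· == 3) = true
      · have := all3_count2 xs h3
        simp [this]
      · simp [eq_false_of_ne_true h3]

-- the machine on pairs, with the gender already fixed: conjunction of gender check and DFA
theorem bLoop_some_eq (ws : List String) (g : Int) (noun : Bool) :
    bLoop ws (some g) noun =
      match mapVocab ws with
      | none => "NO"
      | some ps =>
        cond (ps.all (fun p => p.2 == g) && partsOK noun (ps.map Prod.fst)) "YES" "NO" := by
  induction ws generalizing noun with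
  | nil => cases noun <;> simp [bLoop, mapVocab, partsOK]
  | cons w ws ih =>
    have iht := ih true
    have ihf := ih false
    simp only [bLoop, mapVocab]
    cases hv : check_vocab w with
    | none => simp
    | some p =>
      obtain ⟨part, wg⟩ := p
      simp only []
      cases hm : mapVocab ws with
      | none =>
        rw [hm] at iht ihf
        cases noun with
        | false =>
          by_cases hg : wg = g
          · by_cases h2 : part = 2
            · simp [hg, h2, iht]
            · by_cases h1 : part = 1
              · simp [hg, h1, ihf]
              · simp [hg, h2, h1]
          · simp [hg]
        | true =>
          by_cases hg : wg = g
          · by_cases h3 : part = 3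
            · simp [hg, h3, iht]
            · simp [hg, h3]
          · simp [hg]
      | some ps =>
        rw [hm] at iht ihf
        cases noun with
        | false =>
          by_cases hg : wg = g
          · by_cases h2 : part = 2
            · subst hg; subst h2; rw [iht]; simp [partsOK]
            · by_cases h1 : part = 1
              · subst hg; subst h1; rw [ihf]; simp [partsOK]
              · subst hg; simp [h2, h1, partsOK]
          · have hgf : (wg == g) = false := by simp [hg]
            simp [hgf, hg]
        | true =>
          by_cases hg : wg = g
          · by_cases h3 : part = 3
            · subst hg; subst h3; rw [iht]; simp [partsOK]
            · subst hg; simp [h3, partsOK]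
          · have hgf : (wg == g) = false := by simp [hg]
            simp [hgf, hg]

-- B's whole loop from the initial state: first word fixes the gender
theorem bLoop_none_eq (ws : List String) :
    bLoop ws none false =
      match mapVocab ws with
      | none => "NO"
      | some [] => "NO"
      | some ((part0, g0) :: ps) =>
        cond ((((part0, g0) :: ps).all (fun p => p.2 == g0)) &&
              partsOK false (((part0, g0) :: ps).map Prod.fst)) "YES" "NO" := by
  cases ws with
  | nil => rfl
  | cons w ws' =>
    simp only [bLoop, mapVocab]
    cases hv : check_vocab w with
    | none => simp
    | some p =>
      obtain ⟨part0, g0⟩ := p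
      have iht := bLoop_some_eq ws' g0 true
      have ihf := bLoop_some_eq ws' g0 false
      cases hm : mapVocab ws' with
      | none =>
        rw [hm] at iht ihf
        by_cases h2 : part0 = 2
        · simp [h2, iht]
        · by_cases h1 : part0 = 1
          · simp [h1, ihf]
          · simp [h2, h1]
      | some ps =>
        rw [hm] at iht ihf
        by_cases h2 : part0 = 2
        · subst h2; simp [iht, partsOK]
        · by_cases h1 : part0 = 1
          · subst h1; simp [ihf, partsOK]
          · simp [h2, h1, partsOK]

-- ports agree on the multi-word path
theorem multi_eq (ws : List String) :
    (match aFirstLoop ws 0 with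
     | none => "NO"
     | some (ps, cnt) =>
       if cnt == 0 then "NO"
       else
         match ps with
         | [] => "NO"
         | p0 :: _ =>
           if ¬ aGenderLoop ps p0.2 then "NO"
           else if ¬ aAdjLoop ps then "NO"
           else "YES") = bLoop ws none false := by
  rw [aFirstLoop_eq ws 0 (by norm_num), bLoop_none_eq ws]
  cases hm : mapVocab ws with
  | none => rfl
  | some pp =>
    have hrng := mapVocab_range ws pp hm
    cases pp with
    | nil => simp [countN]
    | cons p0 rest =>
      obtain ⟨part0, g0⟩ := p0
      have hrng' : ∀ x ∈ ((part0, g0) :: rest).map Prod.fst, x = 1 ∨ x = 2 ∨ x = 3 := by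
        intro x hx
        obtain ⟨p, hp, rfl⟩ := List.mem_map.mp hx
        exact hrng p hp
      have hparts := partsOK_false_eq (((part0, g0) :: rest).map Prod.fst) hrng'
      have hc2 := countN_eq_count2 ((part0, g0) :: rest)
      simp only [List.map_cons] at hparts hc2
      have hnn := countN_nonneg ((part0, g0) :: rest)
      simp only [zero_add]
      by_cases hbig : countN ((part0, g0) :: rest) > 1
      · rw [if_pos hbig]
        have hne : ¬ ((part0 :: rest.map Prod.fst).count 2 = 1) := by omega
        simp [hparts, hne]
      · rw [if_neg hbig]
        by_cases h0 : countN ((part0, g0) :: rest) = 0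
        · have hne : ¬ ((part0 :: rest.map Prod.fst).count 2 = 1) := by omega
          simp [h0, hparts, hne]
        · have h1' : countN ((part0, g0) :: rest) = 1 := by omega
          have hcy : ((part0 :: rest.map Prod.fst).count 2 = 1) := by omega
          rw [h1']
          simp only [show ((1 : Int) == 0) = false by decide, Bool.false_eq_true, if_false]
          rw [aGenderLoop_eq, aAdjLoop_eq_adjP]
          simp only [List.map_cons]
          rw [hparts]
          simp only [hcy, decide_true, Bool.true_and, List.all_cons, beq_self_eq_true, Bool.true_and]
          by_cases hall : (rest.all fun p => p.2 == g0) = true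
          · by_cases hadj : adjP (part0 :: rest.map Prod.fst) = true
            · simp [hall, hadj]
            · simp [hall, eq_false_of_ne_true hadj]
          · simp [eq_false_of_ne_true hall]

-- ===== VERDICT (by name: the statement is the Claim_ definition above) =====
theorem check_Lans_lang_spec : Claim_equal_check_Lans_lang := by
  intro s _
  unfold Spec_check_Lans_lang check_Lans_lang check_Lans_lang_alt
  by_cases h1 : ((PySem.Str.split₀ s).length == 1) = true
  · simp only [h1, if_true]
  · simp only [h1, Bool.false_eq_true, if_false]
    exact multi_eq (PySem.Str.split₀ s)
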